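-- pv_equiv track=rewrite | github.com/willsutcliffe/scalable_mtl_hgnn | wmpgnn/performance/reconstruction.py | match_decays
-- ===== SOURCE A (Python) =====
-- def make_decay_dict(decay):
--     """
--     Creates a frequency dictionary from a list of particles in a decay.
--
--     This dictionary counts the occurrences of each unique particle in the
--     provided `decay` list.
--
--     Args:
--         decay : list
--             A list of particles (e.g., strings representing particle names or IDs)
--             in a decay chain.
--
--     Returns:
--         dict
--             A dictionary where keys are unique particles from the `decay` list
--             and values are their respective counts.
--
--     Examples:
--         >>> make_decay_dict(['pi+', 'K-', 'pi+', 'gamma'])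
--         {'pi+': 2, 'K-': 1, 'gamma': 1}
--     """
--     decay_dict ={}
--     for particle in decay:
--         if particle not in decay_dict.keys():
--             decay_dict[particle]=1
--         else:
--             decay_dict[particle]+=1
--     return decay_dict
--
-- def match_decays(decay1, decay2):
--     """
--     Compares two decay lists to determine if they represent the same set of
--     particles with the same multiplicities, regardless of order.
--
--     This function converts each decay list into a frequency dictionary using
--     `make_decay_dict` and then compares these dictionaries for equivalence.
--
--     Args:
--         decay1 : list
--             The first list of particles representing a decay.
--         decay2 : list
--             The second list of particles representing a decay.
--
--     Returns:
--         bool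
--             True if the two decay lists contain the same particles with the same
--             counts; False otherwise.
--
--     Examples:
--         >>> match_decays(['pi+', 'K-'], ['K-', 'pi+'])
--         True
--         >>> match_decays(['pi+', 'pi-'], ['pi+', 'pi+', 'K-'])
--         False
--     """
--     decay_dict1 = make_decay_dict(decay1)
--     decay_dict2 = make_decay_dict(decay2)
--     if len(decay_dict1.keys()) != len(decay_dict2.keys()):
--         return False
--     decay_dict2_keys = decay_dict2.keys()
--     for key in decay_dict1.keys():
--         if key not in decay_dict2_keys:
--             return False
--         elif decay_dict1[key] != decay_dict2[key]:
--             return False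
--     return True
-- ===== SOURCE B (Python) =====
-- def match_decays(decay1, decay2):
--     """Multiset equality via sorting: same particles with same counts."""
--     return sorted(decay1) == sorted(decay2)
-- ===== Notes on version B (the rewrite author's own statement) =====
-- stated objective: idiomatic
-- what changed: Replaces the frequency-dictionary build-and-compare with a one-line sorted(decay1) == sorted(decay2) multiset test.
import Mathlib
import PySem

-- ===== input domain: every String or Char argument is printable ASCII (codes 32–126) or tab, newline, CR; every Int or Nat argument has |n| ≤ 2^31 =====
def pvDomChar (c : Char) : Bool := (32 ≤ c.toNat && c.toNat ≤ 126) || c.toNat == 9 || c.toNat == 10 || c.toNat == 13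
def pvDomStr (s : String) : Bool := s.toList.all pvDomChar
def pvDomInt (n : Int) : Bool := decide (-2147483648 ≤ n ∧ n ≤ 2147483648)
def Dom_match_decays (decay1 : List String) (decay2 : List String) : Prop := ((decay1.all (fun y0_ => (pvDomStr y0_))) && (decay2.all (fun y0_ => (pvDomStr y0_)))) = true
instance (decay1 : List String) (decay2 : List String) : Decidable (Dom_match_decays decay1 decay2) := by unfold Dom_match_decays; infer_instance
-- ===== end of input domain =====

-- B replaces A's frequency-dictionary build-and-compare with sorted(decay1) == sorted(decay2) (idiomatic; return value only, no mutation).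

-- ===== PORT A =====
def make_decay_dict (decay : List String) : PySem.Dict String Int :=
  decay.foldl
    (fun decay_dict particle =>
      if ¬ decay_dict.contains particle then decay_dict.insert particle 1
      else decay_dict.insert particle (decay_dict.getD particle 0 + 1))
    PySem.Dict.empty

def match_decays (decay1 : List String) (decay2 : List String) : Bool :=
  let decay_dict1 := make_decay_dict decay1
  let decay_dict2 := make_decay_dict decay2
  if decay_dict1.keys.length ≠ decay_dict2.keys.length then false
  else
    decay_dict1.keys.all (fun key =>
      decay_dict2.contains key && (decay_dict1.getD key 0 == decay_dict2.getD key 0))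

-- ===== PORT B =====
def match_decays_alt (decay1 : List String) (decay2 : List String) : Bool :=
  PySem.List.sorted decay1 (fun x => x) false == PySem.List.sorted decay2 (fun x => x) false

-- ===== PRECONDITION & SPEC =====
def Spec_match_decays (decay1 : List String) (decay2 : List String) (out : Bool) : Prop := out = match_decays_alt decay1 decay2
instance (decay1 : List String) (decay2 : List String) (out : Bool) : Decidable (Spec_match_decays decay1 decay2 out) := by unfold Spec_match_decays; infer_instance

-- ===== CLAIM (what is proved, stated in full; the proofs are below) =====
def Claim_equal_match_decays : Prop := ∀ (decay1 : List String) (decay2 : List String), Dom_match_decays decay1 decay2 → Spec_match_decays decay1 decay2 (match_decays decay1 decay2)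

-- ===== LEMMAS AND PROOFS =====

-- The branch in A's counting loop is the standard counter fold.
theorem make_decay_dict_eq_counter (decay : List String) :
    make_decay_dict decay = PySem.Dict.counter decay := by
  rw [← PySem.Dict.foldl_insert_getD_add_one_eq_counter]
  unfold make_decay_dict
  congr 1
  funext d p
  by_cases h : d.contains p
  · simp [h]
  · have h0 : d.getD p 0 = 0 :=
      PySem.Dict.getD_of_not_contains d 0 (by simpa using h)
    simp [h, h0]

theorem match_decays_true_iff (decay1 decay2 : List String) :
    match_decays decay1 decay2 = true ↔ decay1.Perm decay2 := by
  unfold match_decays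
  simp only [make_decay_dict_eq_counter, PySem.Dict.keys_counter]
  rw [List.perm_iff_count]
  constructor
  · intro h a
    by_cases hlen : (PySem.Set.ofList decay1).length ≠ (PySem.Set.ofList decay2).length
    · rw [if_pos hlen] at h
      exact absurd h (by simp)
    · rw [if_neg hlen] at h
      simp only [List.all_eq_true, Bool.and_eq_true, beq_iff_eq,
        PySem.Dict.contains_counter, PySem.Dict.getD_counter, List.contains_eq_mem,
        decide_eq_true_eq] at h
      by_cases ha : a ∈ decay1
      · have := h a ((PySem.Set.mem_ofList _ _).mpr ha)
        exact_mod_cast this.2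
      · -- a ∉ decay1: show a ∉ decay2 via subset + equal lengths of the key sets
        have hsub : PySem.Set.ofList decay1 ⊆ PySem.Set.ofList decay2 := by
          intro x hx
          rw [PySem.Set.mem_ofList]
          exact (h x hx).1
        have hperm : (PySem.Set.ofList decay1).Perm (PySem.Set.ofList decay2) :=
          ((PySem.Set.nodup_ofList decay1).subperm hsub).perm_of_length_le
            (le_of_eq (by push Not at hlen; exact hlen.symm))
        have ha2 : a ∉ decay2 := fun hm =>
          ha ((PySem.Set.mem_ofList _ _).mp
            (hperm.mem_iff.mpr ((PySem.Set.mem_ofList _ _).mpr hm)))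
        simp [List.count_eq_zero_of_not_mem ha, List.count_eq_zero_of_not_mem ha2]
  · intro hcnt
    have hmemiff : ∀ a, a ∈ decay1 ↔ a ∈ decay2 := by
      intro a
      rw [← List.count_pos_iff, ← List.count_pos_iff, hcnt a]
    have hlen : (PySem.Set.ofList decay1).length = (PySem.Set.ofList decay2).length := by
      have hp : (PySem.Set.ofList decay1).Perm (PySem.Set.ofList decay2) := by
        apply (List.perm_ext_iff_of_nodup (PySem.Set.nodup_ofList _)
          (PySem.Set.nodup_ofList _)).mpr
        intro a
        rw [PySem.Set.mem_ofList, PySem.Set.mem_ofList]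
        exact hmemiff a
      exact hp.length_eq
    rw [if_neg (by simpa using hlen)]
    simp only [List.all_eq_true, Bool.and_eq_true, beq_iff_eq,
      PySem.Dict.contains_counter, PySem.Dict.getD_counter, List.contains_eq_mem,
      decide_eq_true_eq]
    intro a ha
    rw [PySem.Set.mem_ofList] at ha
    exact ⟨(hmemiff a).mp ha, by exact_mod_cast hcnt a⟩

theorem match_decays_alt_true_iff (decay1 decay2 : List String) :
    match_decays_alt decay1 decay2 = true ↔ decay1.Perm decay2 := by
  unfold match_decays_alt
  rw [beq_iff_eq]
  exact PySem.List.sorted_id_eq_sorted_id_iff_perm decay1 decay2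

-- ===== VERDICT (by name: the statement is the Claim_ definition above) =====
theorem match_decays_spec : Claim_equal_match_decays := by
  intro decay1 decay2 _
  unfold Spec_match_decays
  rw [Bool.eq_iff_iff]
  exact (match_decays_true_iff decay1 decay2).trans
    (match_decays_alt_true_iff decay1 decay2).symm
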